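-- pv_equiv track=rewrite | github.com/maati01/ASD | part2/cwiczenia6/zad7.3.py | map_to_array
-- ===== SOURCE A (Python) =====
-- def map_to_array(T):
--     n = len(T)
--     A = []
--     for i in range(len(T)):
--         A.append(T[i][0])
--         A.append(T[i][1])
--
--     A.sort()
--     B = [A[0]]
--
--     for i in range(1,2*n):
--         if A[i] != A[i-1]:
--             B.append(A[i])
--
--     return B
-- ===== SOURCE B (Python) =====
-- def map_to_array(T):
--     s = set()
--     for x, y in T:
--         s.add(x)
--         s.add(y)
--     return sorted(s)
-- ===== Notes on version B (the rewrite author's own statement) =====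
-- stated objective: idiomatic
-- what changed: B collects the coordinates into a hash set in one pass and returns sorted(set), replacing A's append-all/sort/adjacent-compare deduplication loop.
import Mathlib
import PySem

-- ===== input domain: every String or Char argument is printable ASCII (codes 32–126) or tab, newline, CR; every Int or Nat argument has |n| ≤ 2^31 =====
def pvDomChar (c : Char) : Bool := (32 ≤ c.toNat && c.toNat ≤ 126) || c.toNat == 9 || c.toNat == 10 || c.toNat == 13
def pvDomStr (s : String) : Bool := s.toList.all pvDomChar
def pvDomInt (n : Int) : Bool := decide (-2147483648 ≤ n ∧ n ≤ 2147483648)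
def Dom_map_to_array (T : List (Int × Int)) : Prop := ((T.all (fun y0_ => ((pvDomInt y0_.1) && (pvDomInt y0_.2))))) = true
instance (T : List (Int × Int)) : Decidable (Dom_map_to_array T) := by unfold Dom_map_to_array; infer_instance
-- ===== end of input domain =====

-- B replaces A's append-all / sort / adjacent-compare dedup loop by a one-pass set build followed by sorted(set) (idiomatic).

-- ===== PORT A =====
def map_to_array (T : List (Int × Int)) : List Int :=
  let n : Int := PySem.List.len T
  let A := T.foldl (fun acc p => acc ++ [p.1, p.2]) []
  let As := PySem.List.sorted A (fun x => x) false
  match PySem.List.pyGet? As 0 with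
  | none => []   -- IndexError on empty T; excluded by Pre_
  | some a0 =>
      (PySem.List.pyRange 1 (2 * n) 1).foldl
        (fun B i =>
          if PySem.List.pyGetD As i 0 ≠ PySem.List.pyGetD As (i - 1) 0 then
            B ++ [PySem.List.pyGetD As i 0]
          else B)
        [a0]

-- ===== PORT B =====
def map_to_array_alt (T : List (Int × Int)) : List Int :=
  let s : PySem.Set Int := T.foldl (fun s p => PySem.Set.add (PySem.Set.add s p.1) p.2) PySem.Set.empty
  PySem.List.sorted s (fun x => x) false

-- ===== PRECONDITION & SPEC =====
-- Pre_ excludes exactly the empty list, on which A raises IndexError (A[0] on the empty list).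
def Pre_map_to_array (T : List (Int × Int)) : Prop := T ≠ []
instance (T : List (Int × Int)) : Decidable (Pre_map_to_array T) := by unfold Pre_map_to_array; infer_instance
def pvWitness_map_to_array : (List (Int × Int)) := [(2, 1), (1, 3)]

def Spec_map_to_array (T : List (Int × Int)) (out : List Int) : Prop := out = map_to_array_alt T
instance (T : List (Int × Int)) (out : List Int) : Decidable (Spec_map_to_array T out) := by unfold Spec_map_to_array; infer_instance

-- ===== CLAIM (what is proved, stated in full; the proofs are below) =====
def Claim_equal_map_to_array : Prop := ∀ (T : List (Int × Int)), Dom_map_to_array T → Pre_map_to_array T → Spec_map_to_array T (map_to_array T)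

-- ===== LEMMAS AND PROOFS =====

-- adjacent-dedup keeping the given previous element (the result of A's second loop)
def dd (prev : Int) : List Int → List Int
  | [] => []
  | b :: l => if b ≠ prev then b :: dd b l else dd prev l

theorem fold_eq_dd (L : List Int) (k : Nat) (hk : 1 ≤ k) (hle : k ≤ L.length)
    (prev : Int) (hprev : L[k - 1]? = some prev) (acc : List Int) :
    (PySem.List.pyRange (k : Int) L.length 1).foldl
      (fun B i =>
        if PySem.List.pyGetD L i 0 ≠ PySem.List.pyGetD L (i - 1) 0 then
          B ++ [PySem.List.pyGetD L i 0]
        else B) acc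
    = acc ++ dd prev (L.drop k) := by
  induction hn : L.length - k generalizing k prev acc with
  | zero =>
      have hk' : k = L.length := by omega
      subst hk'
      rw [PySem.List.pyRange_one_eq_nil (by simp)]
      simp [dd]
  | succ m ih =>
      have hklt : k < L.length := by omega
      rw [PySem.List.pyRange_one_cons (show (k : Int) < (L.length : Int) by exact_mod_cast hklt)]
      rw [List.foldl_cons]
      have hgk : PySem.List.pyGetD L (k : Int) 0 = L[k] := by
        rw [PySem.List.pyGetD_eq_getElem L 0 (by positivity) (by exact_mod_cast hklt)]
        simp
      have hgk1 : PySem.List.pyGetD L ((k : Int) - 1) 0 = prev := by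
        have h1 : ((k : Int) - 1) = ((k - 1 : Nat) : Int) := by omega
        rw [h1, PySem.List.pyGetD_eq_getElem L 0 (by positivity)
          (by exact_mod_cast (show k - 1 < L.length by omega))]
        have h2 : L[(k - 1 : Nat)]? = some L[(k - 1 : Nat)] := by
          simp [show k - 1 < L.length by omega]
        rw [hprev] at h2
        simpa using (Option.some_inj.mp h2).symm
      have hdrop : L.drop k = L[k] :: L.drop (k + 1) := List.drop_eq_getElem_cons hklt
      have hcast : ((k : Int) + 1) = ((k + 1 : Nat) : Int) := by push_cast; ring
      simp only [hgk, hgk1]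
      rw [hdrop]
      by_cases hne : L[k] = prev
      · rw [if_neg (by simp [hne]), hcast,
          ih (k + 1) (by omega) (by omega) prev
            (by rw [Nat.add_sub_cancel, List.getElem?_eq_getElem hklt, hne]) _ (by omega)]
        simp [dd, hne]
      · rw [if_pos (by simpa using hne), hcast,
          ih (k + 1) (by omega) (by omega) L[k]
            (by rw [Nat.add_sub_cancel, List.getElem?_eq_getElem hklt]) _ (by omega)]
        simp [dd, hne]

theorem dd_pairwise_mem (prev : Int) (l : List Int) (h : (prev :: l).Pairwise (· ≤ ·)) :
    (prev :: dd prev l).Pairwise (· < ·) ∧ ∀ x, x ∈ prev :: dd prev l ↔ x ∈ prev :: l := by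
  induction l generalizing prev with
  | nil => simp [dd]
  | cons b l ih =>
      have hpb : prev ≤ b := (List.pairwise_cons.mp h).1 b (by simp)
      have hbl : (b :: l).Pairwise (· ≤ ·) := (List.pairwise_cons.mp h).2
      by_cases hb : b = prev
      · subst hb
        obtain ⟨ihp, ihm⟩ := ih b hbl
        rw [show dd b (b :: l) = dd b l from by simp [dd]]
        refine ⟨ihp, fun x => ?_⟩
        rw [List.mem_cons, List.mem_cons, ← List.mem_cons, ihm x]
        simp only [List.mem_cons]
        tauto
      · have hlt : prev < b := lt_of_le_of_ne hpb (fun e => hb e.symm)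
        obtain ⟨ihp, ihm⟩ := ih b hbl
        rw [show dd prev (b :: l) = b :: dd b l from by simp [dd, hb]]
        constructor
        · refine List.pairwise_cons.mpr ⟨?_, ihp⟩
          intro x hx
          have hxm : x ∈ b :: l := (ihm x).mp hx
          rcases List.mem_cons.mp hxm with h1 | h2
          · rw [h1]; exact hlt
          · exact lt_of_lt_of_le hlt ((List.pairwise_cons.mp hbl).1 x h2)
        · intro x
          constructor
          · intro hx
            rcases List.mem_cons.mp hx with h1 | h2
            · simp [h1]
            · have := (ihm x).mp h2
              simp only [List.mem_cons] at this ⊢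
              tauto
          · intro hx
            rcases List.mem_cons.mp hx with h1 | h2
            · simp [h1]
            · exact List.mem_cons.mpr (Or.inr ((ihm x).mpr h2))

theorem eq_of_pairwise_lt_of_mem (l₁ l₂ : List Int)
    (h1 : l₁.Pairwise (· < ·)) (h2 : l₂.Pairwise (· < ·))
    (hm : ∀ x, x ∈ l₁ ↔ x ∈ l₂) : l₁ = l₂ := by
  have n1 : l₁.Nodup := h1.imp (fun h => ne_of_lt h)
  have n2 : l₂.Nodup := h2.imp (fun h => ne_of_lt h)
  have hperm : l₁.Perm l₂ := (List.perm_ext_iff_of_nodup n1 n2).mpr hm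
  exact hperm.eq_of_pairwise (fun a b _ _ hab hba => absurd hba (not_lt_of_gt hab)) h1 h2

theorem setfold_eq_ofList (T : List (Int × Int)) (s : PySem.Set Int) :
    T.foldl (fun s p => PySem.Set.add (PySem.Set.add s p.1) p.2) s
      = (T.flatMap (fun p => [p.1, p.2])).foldl PySem.Set.add s := by
  induction T generalizing s with
  | nil => simp
  | cons p T ih => simp [List.foldl_cons, ih]

theorem flat_len (T : List (Int × Int)) (acc : List Int) :
    (T.foldl (fun acc p => acc ++ [p.1, p.2]) acc).length = acc.length + 2 * T.length := by
  induction T generalizing acc with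
  | nil => simp
  | cons p T ih =>
      rw [List.foldl_cons, ih]
      simp [List.length_append]
      omega

-- ===== VERDICT (by name: the statement is the Claim_ definition above) =====
theorem map_to_array_spec : Claim_equal_map_to_array := by
  intro T _ hT
  unfold Spec_map_to_array map_to_array map_to_array_alt
  simp only []
  set flat := T.foldl (fun acc p => acc ++ [p.1, p.2]) [] with hflat
  have hflatMap : flat = T.flatMap (fun p => [p.1, p.2]) := by
    rw [hflat, PySem.List.foldl_append_eq_flatMap]
    simp
  have hlen : flat.length = 2 * T.length := by
    have h := flat_len T []
    simp only [List.length_nil, Nat.zero_add] at h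
    rw [hflat]
    exact h
  have hne : flat ≠ [] := by
    intro h
    apply hT
    cases T with
    | nil => rfl
    | cons p T => exfalso; have := hlen; rw [h] at this; simp at this
  set As := PySem.List.sorted flat (fun x => x) false with hAs
  have hAsne : As ≠ [] := by
    rw [hAs, Ne, PySem.List.sorted_eq_nil_iff]
    exact hne
  obtain ⟨a0, rest, hcons⟩ := List.exists_cons_of_ne_nil hAsne
  have hget : PySem.List.pyGet? As 0 = some a0 := by
    rw [hcons]; exact PySem.List.pyGet?_zero_cons _ _
  simp only [hget]
  have hlenAs : As.length = 2 * T.length := by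
    rw [hAs, PySem.List.length_sorted, hlen]
  have h2n : (2 * PySem.List.len T : Int) = ((As.length : Nat) : Int) := by
    simp [hlenAs]
  rw [h2n]
  have hAs0 : As[1 - 1]? = some a0 := by simp [hcons]
  have hfold := fold_eq_dd As 1 (le_refl 1) (by rw [hlenAs]; have := List.length_pos_of_ne_nil hT; omega) a0 hAs0 [a0]
  push_cast at hfold
  rw [hfold]
  have hdrop1 : As.drop 1 = rest := by rw [hcons]; simp
  rw [hdrop1]
  have hAsort : (a0 :: rest).Pairwise (· ≤ ·) := by
    have h := PySem.List.sorted_pairwise flat (fun x => x)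
    rw [← hAs, hcons] at h
    exact h
  obtain ⟨hApair, hAmem⟩ := dd_pairwise_mem a0 rest hAsort
  have hBset : T.foldl (fun s p => PySem.Set.add (PySem.Set.add s p.1) p.2) PySem.Set.empty
      = PySem.Set.ofList flat := by
    rw [setfold_eq_ofList, ← hflatMap, PySem.Set.ofList_eq_foldl]
    rfl
  rw [hBset]
  have hBpair : (PySem.List.sorted (PySem.Set.ofList flat) (fun x => x) false).Pairwise (· < ·) :=
    PySem.List.sorted_ofList_pairwise_lt flat
  have hBmem : ∀ x, x ∈ PySem.List.sorted (PySem.Set.ofList flat) (fun x => x) false ↔ x ∈ flat := by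
    intro x
    rw [PySem.List.mem_sorted]
    exact PySem.Set.mem_ofList flat x
  have hAsmem : ∀ x, x ∈ a0 :: rest ↔ x ∈ flat := by
    intro x
    rw [← hcons, hAs, PySem.List.mem_sorted]
  refine (eq_of_pairwise_lt_of_mem _ _ hBpair ?_ ?_).symm
  · simpa using hApair
  · intro x
    rw [hBmem x, ← hAsmem x, ← hAmem x]
    simp
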